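-- pv_equiv track=rewrite | github.com/israely12/stream-manager | src/stream_adapter.py | replace_555_with_666
-- ===== SOURCE A (Python) =====
-- from typing import List
--
-- def replace_555_with_666(arr: List[int]) -> List[int]:
--     arr = arr[:]
--     i = 0
--     while i < len(arr):
--         if arr[i] == 5:
--             count = 1
--             j = i + 1
--             while j < len(arr) and arr[j] == 5:
--                 count += 1
--                 j += 1
--             if count >= 3:
--                 for k in range(i, i + count):
--                     arr[k] = 6
--                 i = j
--             else:
--                 i += 1
--         else:
--             i += 1
--     return arr
-- ===== SOURCE B (Python) =====
-- from typing import List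
--
-- def replace_555_with_666(arr: List[int]) -> List[int]:
--     # A position is rewritten to 6 exactly when it lies inside some window of
--     # three consecutive 5s (equivalently: its maximal run of 5s has length >= 3).
--     n = len(arr)
--
--     def is_hot(i: int) -> bool:
--         return any(arr[j] == arr[j + 1] == arr[j + 2] == 5
--                    for j in range(max(i - 2, 0), min(i, n - 3) + 1))
--
--     return [6 if is_hot(i) else arr[i] for i in range(n)]
-- ===== Notes on version B (the rewrite author's own statement) =====
-- stated objective: alternative
-- what changed: Replaces A's run-scanning while-loop with in-place overwriting by a pointwise sliding-window test: each position is emitted as 6 iff some window of three consecutive 5s covers it (which holds exactly when its maximal 5-run has length >= 3), so no run lengths or jump indices are ever computed.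
import Mathlib
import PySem

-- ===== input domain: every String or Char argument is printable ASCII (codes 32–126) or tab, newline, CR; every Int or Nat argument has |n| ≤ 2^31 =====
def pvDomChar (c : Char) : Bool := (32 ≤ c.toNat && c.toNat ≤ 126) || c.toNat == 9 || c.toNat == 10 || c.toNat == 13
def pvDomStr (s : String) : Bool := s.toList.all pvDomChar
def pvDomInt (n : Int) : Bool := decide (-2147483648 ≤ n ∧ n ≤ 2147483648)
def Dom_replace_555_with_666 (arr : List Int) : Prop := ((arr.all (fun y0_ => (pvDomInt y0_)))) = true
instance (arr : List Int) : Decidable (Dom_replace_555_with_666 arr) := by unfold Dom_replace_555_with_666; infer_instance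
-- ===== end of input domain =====

-- B replaces A's run-scanning while-loop with in-place writes by a pointwise sliding-window test (a position becomes 6 iff some window of three consecutive 5s covers it); return values proved equal (A mutates only its private copy).

-- ===== PORT A =====
-- the inner while loop: number of consecutive 5s starting at index j
def pvCount5 (arr : List Int) (j : Nat) : Nat :=
  if h : j < arr.length ∧ arr.getD j 0 = 5 then 1 + pvCount5 arr (j + 1) else 0
termination_by arr.length - j
decreasing_by omega

-- 'for k in range(i, i + count): arr[k] = 6'
def pvSet6 (arr : List Int) (i c : Nat) : List Int :=
  match c with
  | 0 => arr
  | c + 1 => pvSet6 (arr.set i 6) (i + 1) c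

-- needed by pvLoopA's termination proof
theorem pvSet6_length (c : Nat) : ∀ (arr : List Int) (i : Nat), (pvSet6 arr i c).length = arr.length := by
  induction c with
  | zero => intro arr i; rfl
  | succ c ih => intro arr i; simp [pvSet6, ih]

-- the outer while loop, state = (arr, i); 'count' is 1 + pvCount5 arr (i+1), and j = i + count
def pvLoopA (arr : List Int) (i : Nat) : List Int :=
  if h : i < arr.length then
    if arr.getD i 0 = 5 then
      if 1 + pvCount5 arr (i + 1) ≥ 3 then
        pvLoopA (pvSet6 arr i (1 + pvCount5 arr (i + 1))) (i + (1 + pvCount5 arr (i + 1)))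
      else pvLoopA arr (i + 1)
    else pvLoopA arr (i + 1)
  else arr
termination_by arr.length - i
decreasing_by
  · rw [pvSet6_length]; omega
  · omega
  · omega

def replace_555_with_666 (arr : List Int) : List Int := pvLoopA arr 0

-- ===== PORT B =====
-- 'any(arr[j] == arr[j+1] == arr[j+2] == 5 for j in range(max(i-2,0), min(i,n-3)+1))'
-- (every j the range produces is a valid index, so pyGetD is exact for arr[j] here)
def pvIsHot (arr : List Int) (i : Int) : Bool :=
  (PySem.List.pyRange (max (i - 2) 0) (min i ((arr.length : Int) - 3) + 1) 1).any
    (fun j => decide (PySem.List.pyGetD arr j 0 = PySem.List.pyGetD arr (j + 1) 0 ∧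
                      PySem.List.pyGetD arr (j + 1) 0 = PySem.List.pyGetD arr (j + 2) 0 ∧
                      PySem.List.pyGetD arr (j + 2) 0 = 5))

-- '[6 if is_hot(i) else arr[i] for i in range(n)]'
def replace_555_with_666_alt (arr : List Int) : List Int :=
  (PySem.List.pyRange 0 (arr.length : Int) 1).map
    (fun i => if pvIsHot arr i then 6 else PySem.List.pyGetD arr i 0)

-- ===== PRECONDITION & SPEC =====
def Spec_replace_555_with_666 (arr : List Int) (out : List Int) : Prop := out = replace_555_with_666_alt arr
instance (arr : List Int) (out : List Int) : Decidable (Spec_replace_555_with_666 arr out) := by unfold Spec_replace_555_with_666; infer_instance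

-- ===== CLAIM (what is proved, stated in full; the proofs are below) =====
def Claim_equal_replace_555_with_666 : Prop := ∀ (arr : List Int), Dom_replace_555_with_666 arr → Spec_replace_555_with_666 arr (replace_555_with_666 arr)

-- ===== LEMMAS AND PROOFS =====

-- the run decomposition of a list, the common intermediate form of the proof
def pvGrp (vn : Int × Nat) : List Int :=
  if vn.1 = 5 ∧ vn.2 ≥ 3 then List.replicate vn.2 6 else List.replicate vn.2 vn.1

def pvRle (l : List Int) : List (Int × Nat) :=
  match l with
  | [] => []
  | x :: xs => (x, (xs.takeWhile (· == x)).length + 1) :: pvRle (xs.dropWhile (· == x))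
termination_by l.length
decreasing_by
  have := List.length_dropWhile_le (p := (· == x)) (l := xs); simpa using Nat.lt_succ_of_le this

def pvF (l : List Int) : List Int := (pvRle l).flatMap pvGrp

-- B's value, re-expressed as a map over Nat indices
def pvMap (arr : List Int) : List Int :=
  (List.range arr.length).map (fun (i : Nat) => if pvIsHot arr (i : Int) then 6 else arr.getD i 0)

-- the window predicate over Nat indices: some all-5 window of width 3 covers i
def pvP (arr : List Int) (i : Nat) : Prop :=
  ∃ j : Nat, j ≤ i ∧ i ≤ j + 2 ∧ j + 2 < arr.length ∧
    arr.getD j 0 = 5 ∧ arr.getD (j + 1) 0 = 5 ∧ arr.getD (j + 2) 0 = 5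

theorem pvF_cons (x : Int) (xs : List Int) :
    pvF (x :: xs) =
      pvGrp (x, (xs.takeWhile (· == x)).length + 1) ++ pvF (xs.dropWhile (· == x)) := by
  rw [pvF, pvRle]; simp [pvF]

-- takeWhile/dropWhile on a run of x followed by a rest not starting with x
theorem tw_run (x : Int) (t r : List Int) (ht : ∀ a ∈ t, a = x)
    (hr : ∀ y, r.head? = some y → y ≠ x) :
    (t ++ r).takeWhile (· == x) = t ∧ (t ++ r).dropWhile (· == x) = r := by
  induction t with
  | nil =>
    simp only [List.nil_append]
    cases r with
    | nil => simp
    | cons y ys =>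
      have hy : y ≠ x := hr y rfl
      simp [hy]
  | cons a t ih =>
    have ha : a = x := ht a (by simp)
    have iht := ih (fun b hb => ht b (by simp [hb]))
    constructor
    · rw [List.cons_append, List.takeWhile_cons_of_pos (by simp [ha]), iht.1]
    · rw [List.cons_append, List.dropWhile_cons_of_pos (by simp [ha]), iht.2]

-- the rest after dropWhile does not start with x
theorem dw_head (x : Int) (xs : List Int) :
    ∀ y, (xs.dropWhile (· == x)).head? = some y → y ≠ x := by
  intro y hy
  have h := List.head?_dropWhile_not (· == x) xs
  rw [hy] at h
  simpa using h

-- pvF keeps a leading run verbatim when it is not a 5-run of length ≥ 3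
theorem pvF_keep_run (x : Int) (n : Nat) (r : List Int)
    (hr : ∀ y, r.head? = some y → y ≠ x)
    (hk : ¬ (x = 5 ∧ n ≥ 3)) :
    pvF (List.replicate n x ++ r) = List.replicate n x ++ pvF r := by
  cases n with
  | zero => simp
  | succ n =>
    have hrep : List.replicate (n + 1) x ++ r = x :: (List.replicate n x ++ r) := by
      simp [List.replicate_succ]
    have htw := tw_run x (List.replicate n x) r (fun a ha => List.eq_of_mem_replicate ha) hr
    rw [hrep, pvF_cons, htw.1, htw.2, List.length_replicate, pvGrp,
        if_neg (by rintro ⟨h1, h2⟩; exact hk ⟨h1, by omega⟩)]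

-- pvF turns a leading 5-run of length ≥ 3 into 6s
theorem pvF_replace_run (n : Nat) (r : List Int)
    (hr : ∀ y, r.head? = some y → y ≠ (5:Int)) (h3 : n ≥ 3) :
    pvF (List.replicate n (5:Int) ++ r) = List.replicate n 6 ++ pvF r := by
  cases n with
  | zero => omega
  | succ n =>
    have hrep : List.replicate (n + 1) (5:Int) ++ r = 5 :: (List.replicate n (5:Int) ++ r) := by
      simp [List.replicate_succ]
    have htw := tw_run 5 (List.replicate n 5) r (fun a ha => List.eq_of_mem_replicate ha) hr
    rw [hrep, pvF_cons, htw.1, htw.2, List.length_replicate, pvGrp, if_pos ⟨rfl, by omega⟩]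

-- any list splits as leading run (as a replicate) ++ rest
theorem split_run (x : Int) (xs : List Int) :
    xs = List.replicate (xs.takeWhile (· == x)).length x ++ xs.dropWhile (· == x) := by
  have ht : xs.takeWhile (· == x) = List.replicate (xs.takeWhile (· == x)).length x :=
    List.eq_replicate_length.mpr (fun a ha => by simpa using List.mem_takeWhile_imp ha)
  conv_lhs => rw [← List.takeWhile_append_dropWhile (p := (· == x)) (l := xs)]
  rw [← ht]

-- pvF peels a single kept head element
theorem pvF_head (x : Int) (xs : List Int)
    (hk : ¬ (x = 5 ∧ (xs.takeWhile (· == x)).length + 1 ≥ 3)) :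
    pvF (x :: xs) = x :: pvF xs := by
  have hr := dw_head x xs
  have hs := split_run x xs
  have h1 : pvF (x :: xs) =
      List.replicate ((xs.takeWhile (· == x)).length + 1) x ++ pvF (xs.dropWhile (· == x)) := by
    conv_lhs => rw [hs]
    rw [show x :: (List.replicate (xs.takeWhile (· == x)).length x ++ xs.dropWhile (· == x)) =
          List.replicate ((xs.takeWhile (· == x)).length + 1) x ++ xs.dropWhile (· == x) by
        simp [List.replicate_succ]]
    exact pvF_keep_run x _ _ hr hk
  have h2 : pvF xs = List.replicate (xs.takeWhile (· == x)).length x ++ pvF (xs.dropWhile (· == x)) := by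
    conv_lhs => rw [hs]
    exact pvF_keep_run x _ _ hr (by rintro ⟨h5, hn⟩; exact hk ⟨h5, by omega⟩)
  rw [h1, h2, List.replicate_succ, List.cons_append]

-- the inner while counts exactly the leading 5s of the suffix
theorem pvCount5_eq (arr : List Int) (j : Nat) :
    pvCount5 arr j = ((arr.drop j).takeWhile (· == (5:Int))).length := by
  by_cases h : j < arr.length
  · have hdrop : arr.drop j = arr[j] :: arr.drop (j + 1) := List.drop_eq_getElem_cons h
    by_cases h5 : arr.getD j 0 = 5
    · have hg : arr[j] = (5:Int) := by rwa [List.getD_eq_getElem _ _ h] at h5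
      rw [pvCount5, dif_pos ⟨h, h5⟩, hdrop, hg, List.takeWhile_cons_of_pos (by simp)]
      simp [pvCount5_eq arr (j + 1), Nat.add_comm]
    · have hg : arr[j] ≠ (5:Int) := by rwa [List.getD_eq_getElem _ _ h] at h5
      rw [pvCount5, dif_neg (by tauto), hdrop, List.takeWhile_cons_of_neg (by simp [hg])]
      rfl
  · rw [pvCount5, dif_neg (by tauto), List.drop_eq_nil_of_le (by omega)]; rfl
termination_by arr.length - j
decreasing_by omega

-- the for-loop of in-place writes, as take/replicate/drop
theorem pvSet6_take_drop (c : Nat) : ∀ (arr : List Int) (i : Nat), i + c ≤ arr.length →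
    pvSet6 arr i c = arr.take i ++ List.replicate c 6 ++ arr.drop (i + c) := by
  induction c with
  | zero => intro arr i _; simp [pvSet6]
  | succ c ih =>
    intro arr i hlen
    have hi : i < arr.length := by omega
    rw [pvSet6, ih (arr.set i 6) (i + 1) (by simp; omega)]
    have h1 : (arr.set i 6).take (i + 1) = arr.take i ++ [6] := by
      rw [List.take_set, List.take_add_one, List.getElem?_eq_getElem hi, List.set_append]
      simp [List.length_take, Nat.min_eq_left (le_of_lt hi)]
    have h2 : (arr.set i 6).drop (i + 1 + c) = arr.drop (i + (c + 1)) := by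
      rw [List.drop_set, if_pos (by omega)]; congr 1; omega
    rw [h1, h2]
    simp [List.replicate_succ, List.append_assoc]

-- main invariant of A: the loop from index i returns the untouched prefix plus pvF of the suffix
theorem pvLoopA_eq (arr : List Int) (i : Nat) :
    pvLoopA arr i = arr.take i ++ pvF (arr.drop i) := by
  by_cases h : i < arr.length
  · have hdrop : arr.drop i = arr[i] :: arr.drop (i + 1) := List.drop_eq_getElem_cons h
    have htake : arr.take (i + 1) = arr.take i ++ [arr[i]] := by
      rw [List.take_add_one, List.getElem?_eq_getElem h]; rfl
    have hm : pvCount5 arr (i + 1) = ((arr.drop (i + 1)).takeWhile (· == (5:Int))).length :=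
      pvCount5_eq arr (i + 1)
    by_cases h5 : arr.getD i 0 = 5
    · have hg : arr[i] = (5:Int) := by rwa [List.getD_eq_getElem _ _ h] at h5
      obtain ⟨L, hL⟩ : ∃ L, ((arr.drop (i + 1)).takeWhile (· == (5:Int))).length = L := ⟨_, rfl⟩
      obtain ⟨r, hr_def⟩ : ∃ r, (arr.drop (i + 1)).dropWhile (· == (5:Int)) = r := ⟨_, rfl⟩
      have hrhead : ∀ y, r.head? = some y → y ≠ (5:Int) := by
        rw [← hr_def]; exact dw_head 5 _
      have hs : arr.drop (i + 1) = List.replicate L 5 ++ r := by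
        rw [← hL, ← hr_def]; exact split_run 5 _
      have hmL : pvCount5 arr (i + 1) = L := hm.trans hL
      by_cases hc : 1 + pvCount5 arr (i + 1) ≥ 3
      · -- long 5-run: overwrite with 6s and jump past it
        rw [pvLoopA, dif_pos h, if_pos h5, if_pos hc]
        have hlen : i + (1 + pvCount5 arr (i + 1)) ≤ arr.length := by
          have h1 : ((arr.drop (i + 1)).takeWhile (· == (5:Int))).length ≤ (arr.drop (i + 1)).length :=
            (List.takeWhile_prefix _).length_le
          rw [List.length_drop] at h1; omega
        rw [pvLoopA_eq (pvSet6 arr i (1 + pvCount5 arr (i + 1))) (i + (1 + pvCount5 arr (i + 1))),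
            pvSet6_take_drop _ arr i hlen]
        have hPlen : (arr.take i ++ List.replicate (1 + pvCount5 arr (i + 1)) 6).length
            = i + (1 + pvCount5 arr (i + 1)) := by
          simp [List.length_take]; omega
        rw [List.take_left' hPlen, List.drop_left' hPlen]
        have hdropC : arr.drop (i + (1 + pvCount5 arr (i + 1))) = r := by
          rw [show i + (1 + pvCount5 arr (i + 1)) = i + 1 + L by omega, ← List.drop_drop, hs]
          exact List.drop_left' (by simp)
        have hR : pvF (arr.drop i) = List.replicate (1 + pvCount5 arr (i + 1)) 6 ++ pvF r := by
          rw [hdrop, hg, hs,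
              show (5:Int) :: (List.replicate L 5 ++ r) = List.replicate (L + 1) 5 ++ r by
                simp [List.replicate_succ]]
          rw [pvF_replace_run _ _ hrhead (by omega)]
          congr 2
          omega
        rw [hdropC, hR, List.append_assoc]
      · -- short 5-run: keep and advance by one
        rw [pvLoopA, dif_pos h, if_pos h5, if_neg hc, pvLoopA_eq arr (i + 1), htake, hdrop, hg]
        rw [pvF_head 5 (arr.drop (i + 1)) (by rintro ⟨_, hn⟩; omega), List.append_assoc]
        rfl
    · -- non-5: keep and advance by one
      have hg : arr[i] ≠ (5:Int) := by rwa [List.getD_eq_getElem _ _ h] at h5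
      rw [pvLoopA, dif_pos h, if_neg h5, pvLoopA_eq arr (i + 1), htake, hdrop]
      rw [pvF_head arr[i] (arr.drop (i + 1)) (by rintro ⟨h5x, _⟩; exact hg h5x), List.append_assoc]
      rfl
  · rw [pvLoopA, dif_neg h, List.drop_eq_nil_of_le (by omega),
        List.take_of_length_le (by omega)]
    simp [pvF, pvRle]
termination_by arr.length - i
decreasing_by
  all_goals first
  | omega
  | (rw [pvSet6_length]; omega)

-- ===== now the B side: pvMap equals pvF =====

-- getD through a leading replicate
theorem getD_run (x : Int) (L : Nat) (r : List Int) (k : Nat) :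
    (List.replicate L x ++ r).getD k 0 = if k < L then x else r.getD (k - L) 0 := by
  by_cases h : k < L
  · rw [if_pos h, List.getD_eq_getElem _ _ (by simp; omega),
        List.getElem_append_left (by simpa using h)]
    simp
  · rw [if_neg h, List.getD_append_right _ _ _ _ (by simp; omega)]
    simp

-- the window predicate ignores a leading run when the index is past it
theorem pvP_shift (x : Int) (L : Nat) (r : List Int)
    (hr : ∀ y, r.head? = some y → y ≠ x) (i' : Nat) :
    pvP (List.replicate L x ++ r) (L + i') ↔ pvP r i' := by
  constructor
  · rintro ⟨j, hj1, hj2, hj3, h5a, h5b, h5c⟩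
    simp only [List.length_append, List.length_replicate] at hj3
    by_cases hjL : j < L
    · exfalso
      -- the window would cover index L, where r starts with a value ≠ x, yet arr[j] = x = 5
      have hx5 : x = 5 := by rwa [getD_run, if_pos hjL] at h5a
      have hrne : r ≠ [] := by intro hnil; rw [hnil] at hj3; simp at hj3; omega
      have hr0 : r.getD 0 0 ≠ x := by
        cases r with
        | nil => exact absurd rfl hrne
        | cons a as => exact hr a rfl
      have hL5 : (List.replicate L x ++ r).getD L 0 = 5 := by
        rcases (by omega : L = j ∨ L = j + 1 ∨ L = j + 2) with hE | hE | hE <;> subst hE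
        · exact h5a
        · exact h5b
        · exact h5c
      rw [getD_run, if_neg (by omega), Nat.sub_self] at hL5
      exact hr0 (by rw [hL5, hx5])
    · refine ⟨j - L, by omega, by omega, by omega, ?_, ?_, ?_⟩
      · rwa [getD_run, if_neg (by omega)] at h5a
      · rw [getD_run, if_neg (by omega), show j + 1 - L = j - L + 1 by omega] at h5b
        exact h5b
      · rw [getD_run, if_neg (by omega), show j + 2 - L = j - L + 2 by omega] at h5c
        exact h5c
  · rintro ⟨j, hj1, hj2, hj3, h5a, h5b, h5c⟩
    refine ⟨L + j, by omega, by omega, by simp; omega, ?_, ?_, ?_⟩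
    · rw [getD_run, if_neg (by omega), Nat.add_sub_cancel_left]; exact h5a
    · rw [getD_run, if_neg (by omega), show L + j + 1 - L = j + 1 by omega]; exact h5b
    · rw [getD_run, if_neg (by omega), show L + j + 2 - L = j + 2 by omega]; exact h5c

-- inside a 5-run of length ≥ 3 the window predicate holds
theorem pvP_inside_hot (L : Nat) (r : List Int) (h3 : 3 ≤ L) (i : Nat) (hi : i < L) :
    pvP (List.replicate L (5:Int) ++ r) i := by
  refine ⟨min i (L - 3), by omega, by omega, by simp; omega, ?_, ?_, ?_⟩ <;>
    rw [getD_run, if_pos (by omega)]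

-- inside any other run the window predicate fails
theorem pvP_inside_cold (x : Int) (L : Nat) (r : List Int)
    (hr : ∀ y, r.head? = some y → y ≠ x)
    (hk : ¬ (x = 5 ∧ L ≥ 3)) (i : Nat) (hi : i < L) :
    ¬ pvP (List.replicate L x ++ r) i := by
  rintro ⟨j, hj1, hj2, hj3, h5a, h5b, h5c⟩
  simp only [List.length_append, List.length_replicate] at hj3
  have hjL : j < L := by omega
  have hx5 : x = 5 := by rwa [getD_run, if_pos hjL] at h5a
  have hL3 : L < 3 := by by_contra hcon; exact hk ⟨hx5, by omega⟩
  have hrne : r ≠ [] := by intro hnil; rw [hnil] at hj3; simp at hj3; omega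
  have hr0 : r.getD 0 0 ≠ x := by
    cases r with
    | nil => exact absurd rfl hrne
    | cons a as => exact hr a rfl
  have hL5 : (List.replicate L x ++ r).getD L 0 = 5 := by
    rcases (by omega : L = j ∨ L = j + 1 ∨ L = j + 2) with hE | hE | hE <;> subst hE
    · exact h5a
    · exact h5b
    · exact h5c
  rw [getD_run, if_neg (by omega), Nat.sub_self] at hL5
  exact hr0 (by rw [hL5, hx5])

-- B's helper computes exactly the window predicate
theorem hot_iff (arr : List Int) (i : Nat) :
    pvIsHot arr (i : Int) = true ↔ pvP arr i := by
  unfold pvIsHot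
  rw [List.any_eq_true]
  constructor
  · rintro ⟨z, hz, hp⟩
    rw [PySem.List.mem_pyRange_one] at hz
    obtain ⟨hlo, hhi⟩ := hz
    have hz0 : 0 ≤ z := le_trans (le_max_right _ _) hlo
    have hzi : z ≤ (i : Int) := by
      have h1 : min (i:Int) ((arr.length:Int) - 3) ≤ (i:Int) := min_le_left _ _
      omega
    have hzn : z + 2 < (arr.length : Int) := by
      have h1 : min (i:Int) ((arr.length:Int) - 3) ≤ (arr.length:Int) - 3 := min_le_right _ _
      omega
    have hiz : (i : Int) ≤ z + 2 := by
      have h1 := le_trans (le_max_left ((i:Int) - 2) 0) hlo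
      omega
    obtain ⟨j, rfl⟩ : ∃ j : Nat, z = (j : Int) := ⟨z.toNat, by omega⟩
    simp only [decide_eq_true_eq] at hp
    rw [show (j : Int) + 1 = ((j + 1 : Nat) : Int) by push_cast; ring,
        show (j : Int) + 2 = ((j + 2 : Nat) : Int) by push_cast; ring,
        PySem.List.pyGetD_natCast, PySem.List.pyGetD_natCast, PySem.List.pyGetD_natCast] at hp
    exact ⟨j, by omega, by omega, by omega,
      by rw [hp.1, hp.2.1, hp.2.2], by rw [hp.2.1, hp.2.2], hp.2.2⟩
  · rintro ⟨j, hj1, hj2, hj3, h5a, h5b, h5c⟩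
    refine ⟨(j : Int), ?_, ?_⟩
    · rw [PySem.List.mem_pyRange_one]
      refine ⟨max_le (by omega) (by omega), ?_⟩
      have h1 : (j : Int) ≤ (i : Int) := by omega
      have h2 : (j : Int) ≤ (arr.length : Int) - 3 := by omega
      have h3 := le_min h1 h2
      omega
    · rw [show (j : Int) + 1 = ((j + 1 : Nat) : Int) by push_cast; ring,
          show (j : Int) + 2 = ((j + 2 : Nat) : Int) by push_cast; ring,
          PySem.List.pyGetD_natCast, PySem.List.pyGetD_natCast, PySem.List.pyGetD_natCast]
      simp only [decide_eq_true_eq]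
      exact ⟨by rw [h5a, h5b], by rw [h5b, h5c], h5c⟩

-- B equals pvMap (pyRange over Int indices becomes List.range over Nat indices)
theorem alt_eq_pvMap (arr : List Int) : replace_555_with_666_alt arr = pvMap arr := by
  unfold replace_555_with_666_alt pvMap
  rw [PySem.List.pyRange_zero_natCast, List.map_map]
  apply List.map_congr_left
  intro k _
  simp [PySem.List.pyGetD_natCast]

theorem pvMap_length (arr : List Int) : (pvMap arr).length = arr.length := by
  simp [pvMap]

theorem pvMap_getD (arr : List Int) (i : Nat) (h : i < arr.length) :
    (pvMap arr).getD i 0 = if pvIsHot arr (i : Int) then 6 else arr.getD i 0 := by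
  rw [List.getD_eq_getElem _ _ (by rwa [pvMap_length])]
  simp [pvMap]

-- pvMap splits along a leading 5-run of length ≥ 3 …
theorem pvMap_run_hot (L : Nat) (r : List Int)
    (hr : ∀ y, r.head? = some y → y ≠ (5:Int)) (h3 : 3 ≤ L) :
    pvMap (List.replicate L (5:Int) ++ r) = List.replicate L 6 ++ pvMap r := by
  apply List.ext_getElem (by simp [pvMap_length])
  intro i h1 h2
  rw [← List.getD_eq_getElem _ 0 h1, ← List.getD_eq_getElem _ 0 h2]
  have hi : i < L + r.length := by rw [pvMap_length] at h1; simpa using h1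
  rw [pvMap_getD _ _ (by simp; omega), getD_run 6 L (pvMap r) i, getD_run 5 L r i]
  by_cases hiL : i < L
  · rw [if_pos hiL, if_pos hiL, if_pos ((hot_iff _ i).mpr (pvP_inside_hot L r h3 i hiL))]
  · rw [if_neg hiL, if_neg hiL]
    have hsh : pvP (List.replicate L (5:Int) ++ r) i ↔ pvP r (i - L) := by
      have := pvP_shift 5 L r hr (i - L)
      rwa [show L + (i - L) = i by omega] at this
    rw [pvMap_getD r _ (by omega)]
    by_cases hp : pvP r (i - L)
    · rw [if_pos ((hot_iff _ i).mpr (hsh.mpr hp)), if_pos ((hot_iff r (i - L)).mpr hp)]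
    · rw [if_neg (fun hh => hp (hsh.mp ((hot_iff _ i).mp hh))),
          if_neg (fun hh => hp ((hot_iff r (i - L)).mp hh))]

-- … and keeps every other leading run verbatim
theorem pvMap_run_cold (x : Int) (L : Nat) (r : List Int)
    (hr : ∀ y, r.head? = some y → y ≠ x)
    (hk : ¬ (x = 5 ∧ L ≥ 3)) :
    pvMap (List.replicate L x ++ r) = List.replicate L x ++ pvMap r := by
  apply List.ext_getElem (by simp [pvMap_length])
  intro i h1 h2
  rw [← List.getD_eq_getElem _ 0 h1, ← List.getD_eq_getElem _ 0 h2]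
  have hi : i < L + r.length := by rw [pvMap_length] at h1; simpa using h1
  rw [pvMap_getD _ _ (by simp; omega), getD_run x L (pvMap r) i, getD_run x L r i]
  by_cases hiL : i < L
  · rw [if_pos hiL, if_pos hiL,
        if_neg (fun hh => (pvP_inside_cold x L r hr hk i hiL) ((hot_iff _ i).mp hh))]
  · rw [if_neg hiL, if_neg hiL]
    have hsh : pvP (List.replicate L x ++ r) i ↔ pvP r (i - L) := by
      have := pvP_shift x L r hr (i - L)
      rwa [show L + (i - L) = i by omega] at this
    rw [pvMap_getD r _ (by omega)]
    by_cases hp : pvP r (i - L)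
    · rw [if_pos ((hot_iff _ i).mpr (hsh.mpr hp)), if_pos ((hot_iff r (i - L)).mpr hp)]
    · rw [if_neg (fun hh => hp (hsh.mp ((hot_iff _ i).mp hh))),
          if_neg (fun hh => hp ((hot_iff r (i - L)).mp hh))]

-- the run decomposition value equals B's pointwise value
theorem pvF_eq_pvMap (arr : List Int) : pvF arr = pvMap arr := by
  match arr with
  | [] => simp [pvF, pvRle, pvMap]
  | x :: xs =>
    have hr := dw_head x xs
    have hsplit : x :: xs =
        List.replicate ((xs.takeWhile (· == x)).length + 1) x ++ xs.dropWhile (· == x) := by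
      rw [List.replicate_succ, List.cons_append]
      congr 1
      exact split_run x xs
    have ih := pvF_eq_pvMap (xs.dropWhile (· == x))
    by_cases hc : x = 5 ∧ (xs.takeWhile (· == x)).length + 1 ≥ 3
    · obtain ⟨rfl, h3⟩ := hc
      rw [hsplit, pvF_replace_run _ _ hr h3, pvMap_run_hot _ _ hr h3, ih]
    · rw [hsplit, pvF_keep_run x _ _ hr hc, pvMap_run_cold x _ _ hr hc, ih]
termination_by arr.length
decreasing_by
  have := List.length_dropWhile_le (p := (· == x)) (l := xs)
  simpa using Nat.lt_succ_of_le this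

-- ===== VERDICT (by name: the statement is the Claim_ definition above) =====
theorem replace_555_with_666_spec : Claim_equal_replace_555_with_666 := by
  intro arr _
  unfold Spec_replace_555_with_666
  rw [alt_eq_pvMap, ← pvF_eq_pvMap, replace_555_with_666, pvLoopA_eq]
  simp
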